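-- pv_equiv track=rewrite | github.com/catkin/catkin_tools | tests/unit/test_job_flag_regex.py | check_only_strings_in_list_util
-- ===== SOURCE A (Python) =====
-- def check_only_strings_in_list_util(mflags, args_list):
--     """Utility function for testing regular expressions used in argument parsing
--
--     Tests if all space-separated values in mflags are in args_list and
--     that there are no extra entries in args_list. If either of these
--     tests fail, we return false.
--
--     :param mflags: space separated string of arguments
--     :type mflags: str
--     :param args_list: list of strings to test against
--     :type args_list: list
--     :returns: if tests pass
--     :rtype: bool
--     """
--     split_flags = mflags.split()
--     if len(args_list) != len(split_flags):
--         return False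
--     for arg in args_list:
--         if arg not in split_flags:
--             return False
--         else:
--             first_index = next(
--                 i for i, val in enumerate(split_flags) if val == arg)
--             split_flags.pop(first_index)
--     if not split_flags:
--         return True
--     else:
--         return False
-- ===== SOURCE B (Python) =====
-- def check_only_strings_in_list_util(mflags, args_list):
--     """Multiset equality via sorting: same flags iff both sorted sequences match."""
--     return sorted(args_list) == sorted(mflags.split())
-- ===== Notes on version B (the rewrite author's own statement) =====
-- stated objective: simpler
-- what changed: Replaces the length check plus scan-and-pop-first-match loop with a single sort of both sequences and one elementwise comparison (sorted(args_list) == sorted(mflags.split())).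
import Mathlib
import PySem

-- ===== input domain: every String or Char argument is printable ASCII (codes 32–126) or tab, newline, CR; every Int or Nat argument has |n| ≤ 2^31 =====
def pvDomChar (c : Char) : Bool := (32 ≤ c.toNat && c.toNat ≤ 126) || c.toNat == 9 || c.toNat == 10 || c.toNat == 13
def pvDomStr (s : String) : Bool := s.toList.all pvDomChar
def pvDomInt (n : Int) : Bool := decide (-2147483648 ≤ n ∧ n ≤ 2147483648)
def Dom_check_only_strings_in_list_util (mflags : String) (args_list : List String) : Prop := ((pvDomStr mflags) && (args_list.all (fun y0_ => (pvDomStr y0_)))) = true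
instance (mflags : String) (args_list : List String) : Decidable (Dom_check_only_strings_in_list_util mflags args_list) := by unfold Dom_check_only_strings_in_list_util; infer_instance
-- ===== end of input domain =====

-- B replaces A's length check + scan-and-pop-first-match loop by sorting both
-- sequences once and comparing them (simpler; equality of multisets via sorting).


-- ===== PORT A =====
-- the for-loop over args_list carrying the mutable split_flags; the pop of the
-- first index where val == arg is PySem.List.remove? (none branch is unreachable,
-- a totality guard only: membership was just checked)
def pvLoopA : List String → List String → Bool
  | [], split_flags => if split_flags.isEmpty then true else false
  | arg :: rest, split_flags =>
      if split_flags.contains arg then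
        match PySem.List.remove? split_flags arg with
        | some split_flags' => pvLoopA rest split_flags'
        | none => false
      else false

def check_only_strings_in_list_util (mflags : String) (args_list : List String) : Bool :=
  let split_flags := PySem.Str.split₀ mflags
  if args_list.length ≠ split_flags.length then false
  else pvLoopA args_list split_flags

-- ===== PORT B =====
def check_only_strings_in_list_util_alt (mflags : String) (args_list : List String) : Bool :=
  PySem.List.sorted args_list (fun x => x) false == PySem.List.sorted (PySem.Str.split₀ mflags) (fun x => x) false

-- ===== PRECONDITION & SPEC =====
def Spec_check_only_strings_in_list_util (mflags : String) (args_list : List String) (out : Bool) : Prop := out = check_only_strings_in_list_util_alt mflags args_list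
instance (mflags : String) (args_list : List String) (out : Bool) : Decidable (Spec_check_only_strings_in_list_util mflags args_list out) := by unfold Spec_check_only_strings_in_list_util; infer_instance

-- ===== CLAIM (what is proved, stated in full; the proofs are below) =====
def Claim_equal_check_only_strings_in_list_util : Prop := ∀ (mflags : String) (args_list : List String), Dom_check_only_strings_in_list_util mflags args_list → Spec_check_only_strings_in_list_util mflags args_list (check_only_strings_in_list_util mflags args_list)

-- ===== LEMMAS AND PROOFS =====

-- A's loop succeeds exactly on permutations of the remaining flags
theorem pvLoopA_eq_true_iff (args flags : List String) :
    pvLoopA args flags = true ↔ args.Perm flags := by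
  induction args generalizing flags with
  | nil => cases flags <;> simp [pvLoopA]
  | cons a rest ih =>
    rw [pvLoopA]
    by_cases hmem : a ∈ flags
    · rw [if_pos (by simpa using hmem), PySem.List.remove?_eq_some_erase flags a hmem]
      simp [ih, List.cons_perm_iff_perm_erase, hmem]
    · rw [if_neg (by simpa using hmem)]
      simp [List.cons_perm_iff_perm_erase, hmem]

theorem checkA_eq_perm (mflags : String) (args_list : List String) :
    check_only_strings_in_list_util mflags args_list
      = decide (args_list.Perm (PySem.Str.split₀ mflags)) := by
  unfold check_only_strings_in_list_util
  by_cases hl : args_list.length ≠ (PySem.Str.split₀ mflags).length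
  · rw [if_pos hl]
    have : ¬ args_list.Perm (PySem.Str.split₀ mflags) := fun hp => hl hp.length_eq
    simp [this]
  · rw [if_neg hl]
    rw [Bool.eq_iff_iff]
    simp [pvLoopA_eq_true_iff]

-- ===== VERDICT (by name: the statement is the Claim_ definition above) =====
theorem check_only_strings_in_list_util_spec : Claim_equal_check_only_strings_in_list_util := by
  intro mflags args_list _
  unfold Spec_check_only_strings_in_list_util check_only_strings_in_list_util_alt
  rw [checkA_eq_perm, Bool.eq_iff_iff]
  simp [PySem.List.sorted_id_eq_sorted_id_iff_perm]
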